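-- pv_equiv track=rewrite | github.com/MaxPhilb/epicArduino | chenillard/main.py | createBoolStringExclusive
-- ===== SOURCE A (Python) =====
-- def createBoolStringExclusive(id,state):
--     str="";
--     for i in range(32):
--         if i==id:
--             if state:
--                 str+="1,";
--             else:
--                 str+="0,";
--         else:
--             str+="x,";
--     str=str[0:len(str)-1];
--     return str
-- ===== SOURCE B (Python) =====
-- def createBoolStringExclusive(id, state):
--     fields = ["x"] * 32
--     if 0 <= id < 32:
--         fields[id] = "1" if state else "0"
--     return ",".join(fields)
-- ===== Notes on version B (the rewrite author's own statement) =====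
-- stated objective: simpler
-- what changed: Replaces A's 32-step per-index branching string accumulation plus trailing-comma slice with building 32 'x' fields, patching the single in-range slot, and ','.join.
import Mathlib
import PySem

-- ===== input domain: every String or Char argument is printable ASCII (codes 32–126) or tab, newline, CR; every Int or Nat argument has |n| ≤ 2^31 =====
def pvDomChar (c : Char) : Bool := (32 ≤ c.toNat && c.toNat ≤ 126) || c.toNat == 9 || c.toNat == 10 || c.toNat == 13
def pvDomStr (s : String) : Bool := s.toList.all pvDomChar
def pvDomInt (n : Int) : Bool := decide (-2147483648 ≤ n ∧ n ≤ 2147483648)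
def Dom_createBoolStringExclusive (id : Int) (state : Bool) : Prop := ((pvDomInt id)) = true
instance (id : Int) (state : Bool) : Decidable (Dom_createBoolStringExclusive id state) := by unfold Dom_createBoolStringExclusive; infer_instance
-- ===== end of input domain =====

-- B builds the 32 fields uniformly and patches the one marked slot, instead of A's
-- per-index branching accumulation loop; objective: simpler.
-- String accumulation/slicing is ported exactly on List Char (String.ofList at the end),
-- since Python string concatenation is exact list concatenation of characters.

-- ===== PORT A =====
def createBoolStringExclusive (id : Int) (state : Bool) : String :=
  -- str = ""; for i in range(32): ... ; str = str[0:len(str)-1]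
  let str : List Char := (PySem.List.pyRange 0 32 1).foldl
    (fun s i =>
      if i == id then
        (if state then s ++ ['1', ','] else s ++ ['0', ','])
      else s ++ ['x', ',']) []
  String.ofList (PySem.List.slice str (some 0) (some ((str.length : Int) - 1)))

-- ===== PORT B =====
def createBoolStringExclusive_alt (id : Int) (state : Bool) : String :=
  -- fields = ["x"] * 32; if 0 <= id < 32: fields[id] = "1" if state else "0"; ",".join(fields)
  let fields : List (List Char) := List.replicate 32 ['x']
  let fields :=
    if 0 ≤ id ∧ id < 32 then fields.set id.toNat [if state then '1' else '0'] else fields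
  String.ofList (PySem.Chars.join [','] fields)

-- ===== PRECONDITION & SPEC =====
def Spec_createBoolStringExclusive (id : Int) (state : Bool) (out : String) : Prop := out = createBoolStringExclusive_alt id state
instance (id : Int) (state : Bool) (out : String) : Decidable (Spec_createBoolStringExclusive id state out) := by unfold Spec_createBoolStringExclusive; infer_instance

-- ===== CLAIM (what is proved, stated in full; the proofs are below) =====
def Claim_equal_createBoolStringExclusive : Prop := ∀ (id : Int) (state : Bool), Dom_createBoolStringExclusive id state → Spec_createBoolStringExclusive id state (createBoolStringExclusive id state)

-- ===== LEMMAS AND PROOFS =====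

-- Out of range: every iteration of A's loop takes the 'x,' branch.
theorem pv_out_of_range (id : Int) (state : Bool) (h : ¬ (0 ≤ id ∧ id < 32)) :
    createBoolStringExclusive id state = createBoolStringExclusive_alt id state := by
  simp only [createBoolStringExclusive, createBoolStringExclusive_alt]
  have hcongr : (PySem.List.pyRange 0 32 1).foldl
      (fun (s : List Char) (i : Int) =>
        if i == id then
          (if state then s ++ ['1', ','] else s ++ ['0', ','])
        else s ++ ['x', ',']) []
      = (PySem.List.pyRange 0 32 1).foldl (fun (s : List Char) (_ : Int) => s ++ ['x', ',']) [] := by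
    apply PySem.List.foldl_congr_mem
    intro s x hx
    rw [PySem.List.mem_pyRange_one] at hx
    have hne : x ≠ id := by omega
    simp [hne]
  rw [hcongr, if_neg h]
  decide

theorem pv_equal (id : Int) (state : Bool) :
    createBoolStringExclusive id state = createBoolStringExclusive_alt id state := by
  by_cases h : 0 ≤ id ∧ id < 32
  · obtain ⟨h0, h1⟩ := h
    cases state <;> interval_cases id <;> decide
  · exact pv_out_of_range id state h

-- ===== VERDICT (by name: the statement is the Claim_ definition above) =====
theorem createBoolStringExclusive_spec : Claim_equal_createBoolStringExclusive := by
  intro id state _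
  exact pv_equal id state
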